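-- pv_equiv track=rewrite | github.com/thorwhalen/atonal | atonal/base.py | best_normal_order
-- ===== SOURCE A (Python) =====
-- from typing import (
--     Iterable,
--     Iterator,
--     List,
--     Tuple,
--     Callable,
--     Dict,
--     Any,
--     Sequence,
--     Set,
--     FrozenSet,
--     Optional,
--     Hashable,
-- )
--
-- def best_normal_order(pc_set: Iterable[int]) -> Tuple[int, ...]:
--     """Return the best normal order (Forte's packed rotation).
--
--     This is the *pre-prime* ordering: a circular permutation of the pcs in
--     ascending registral order, chosen to be most compact.
--
--     Field utility (dataset): “Best Normal Order” provides the canonical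
--     *template ordering* before transposition-to-0, useful for identifying sets
--     encountered in music.
--
--     >>> best_normal_order((0, 4, 7))
--     (0, 4, 7)
--     >>> best_normal_order((11, 0, 3, 8))  # one valid compact ordering
--     (8, 11, 0, 3)
--     """
--
--     pcs = sorted(set(pc_set))
--     if not pcs:
--         return ()
--     if len(pcs) == 1:
--         return (pcs[0],)
--
--     candidates: List[Tuple[int, ...]] = []
--     n = len(pcs)
--     for i in range(n):
--         rotated = pcs[i:] + [p + 12 for p in pcs[:i]]
--         span = rotated[-1] - rotated[0]
--         # requirement 2: tie-break by smallest successive distance-from-first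
--         dist_from_first = tuple(rotated[j] - rotated[0] for j in range(1, n))
--         candidates.append((span, dist_from_first, tuple(p % 12 for p in rotated)))
--
--     candidates.sort(key=lambda t: (t[0], t[1]))
--     return candidates[0][2]
-- ===== SOURCE B (Python) =====
-- def best_normal_order(pc_set):
--     pcs = sorted(set(pc_set))
--     if not pcs:
--         return ()
--     if len(pcs) == 1:
--         return (pcs[0],)
--
--     n = len(pcs)
--
--     def rotation(i):
--         return pcs[i:] + [p + 12 for p in pcs[:i]]
--
--     def key(rotated):
--         first = rotated[0]
--         return (rotated[-1] - first, [r - first for r in rotated[1:]])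
--
--     best_rot = rotation(0)
--     best_key = key(best_rot)
--     for i in range(1, n):
--         rot = rotation(i)
--         k = key(rot)
--         if k[0] < best_key[0] or (k[0] == best_key[0] and k[1] < best_key[1]):
--             best_key, best_rot = k, rot
--     return tuple(p % 12 for p in best_rot)
-- ===== Notes on version B (the rewrite author's own statement) =====
-- stated objective: faster
-- what changed: Replaces building a list of all rotation candidates and stable-sorting it by (span, distances) with a single ascending pass that keeps one running best rotation under a strict-less key comparison, reducing pitch classes mod 12 only once for the winner.
import Mathlib
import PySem

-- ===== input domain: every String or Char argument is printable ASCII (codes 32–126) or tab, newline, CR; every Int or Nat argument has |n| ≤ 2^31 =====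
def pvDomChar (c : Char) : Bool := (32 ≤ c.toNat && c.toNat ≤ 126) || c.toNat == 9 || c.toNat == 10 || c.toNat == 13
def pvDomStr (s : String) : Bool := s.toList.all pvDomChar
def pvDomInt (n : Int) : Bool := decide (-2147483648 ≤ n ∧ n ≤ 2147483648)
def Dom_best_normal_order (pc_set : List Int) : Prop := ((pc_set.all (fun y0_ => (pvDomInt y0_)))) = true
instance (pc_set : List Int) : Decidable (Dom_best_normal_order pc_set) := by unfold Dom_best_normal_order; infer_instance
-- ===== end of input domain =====

-- B replaces A's candidate list + stable sort by a single ascending min-scan over the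
-- rotations with a strict-less key comparison, reducing mod 12 only the winning rotation.

-- ===== PORT A =====
-- candidate built in A's loop body: (span, dist_from_first, rotation mod 12)
def bnoCandidate (pcs : List Int) (n i : Int) : Int × List Int × List Int :=
  let rotated := PySem.List.slice pcs (some i) none ++
                 (PySem.List.slice pcs none (some i)).map (fun p => p + 12)
  let span := PySem.List.pyGetD rotated (-1) 0 - PySem.List.pyGetD rotated 0 0
  let dist := (PySem.List.pyRange 1 n 1).map
                (fun j => PySem.List.pyGetD rotated j 0 - PySem.List.pyGetD rotated 0 0)
  (span, dist, rotated.map (fun p => PySem.Int.mod p 12))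

def best_normal_order (pc_set : List Int) : List Int :=
  let pcs := PySem.List.sorted (PySem.Set.ofList pc_set) (fun x => x) false
  if pcs = [] then []
  else if pcs.length = 1 then [PySem.List.pyGetD pcs 0 0]
  else
    let n : Int := pcs.length
    let candidates : List (Int × List Int × List Int) :=
      (PySem.List.pyRange 0 n 1).foldl (fun acc i => acc ++ [bnoCandidate pcs n i]) []
    let sortedc := PySem.List.sorted2 candidates (fun t => t.1) (fun t => t.2.1) false
    (PySem.List.pyGetD sortedc 0 (0, [], [])).2.2

-- ===== PORT B =====
def bnoRotation (pcs : List Int) (i : Int) : List Int :=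
  PySem.List.slice pcs (some i) none ++
  (PySem.List.slice pcs none (some i)).map (fun p => p + 12)

def bnoKey (rotated : List Int) : Int × List Int :=
  let first := PySem.List.pyGetD rotated 0 0
  (PySem.List.pyGetD rotated (-1) 0 - first,
   (PySem.List.slice rotated (some 1) none).map (fun r => r - first))

def best_normal_order_alt (pc_set : List Int) : List Int :=
  let pcs := PySem.List.sorted (PySem.Set.ofList pc_set) (fun x => x) false
  if pcs = [] then []
  else if pcs.length = 1 then [PySem.List.pyGetD pcs 0 0]
  else
    let n : Int := pcs.length
    let best := (PySem.List.pyRange 1 n 1).foldl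
      (fun (best : (Int × List Int) × List Int) i =>
        let rot := bnoRotation pcs i
        let k := bnoKey rot
        if k.1 < best.1.1 ∨ (k.1 = best.1.1 ∧ k.2 < best.1.2) then (k, rot) else best)
      (bnoKey (bnoRotation pcs 0), bnoRotation pcs 0)
    best.2.map (fun p => PySem.Int.mod p 12)

-- ===== PRECONDITION & SPEC =====
def Spec_best_normal_order (pc_set : List Int) (out : List Int) : Prop := out = best_normal_order_alt pc_set
instance (pc_set : List Int) (out : List Int) : Decidable (Spec_best_normal_order pc_set out) := by unfold Spec_best_normal_order; infer_instance

-- ===== CLAIM (what is proved, stated in full; the proofs are below) =====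
def Claim_equal_best_normal_order : Prop := ∀ (pc_set : List Int), Dom_best_normal_order pc_set → Spec_best_normal_order pc_set (best_normal_order pc_set)

-- ===== LEMMAS AND PROOFS =====

-- the head of an insertBy-insertion is the min-update of the previous head
theorem bno_head?_insertBy {α : Type} (before : α → α → Bool) (x : α) (acc : List α) :
    (PySem.List.insertBy before x acc).head? =
      some (match acc with | [] => x | y :: _ => if before x y then x else y) := by
  cases acc with
  | nil => rfl
  | cons y ys => simp only [PySem.List.insertBy]; split <;> rfl

def bnoOptStep {α : Type} (before : α → α → Bool) (m? : Option α) (x : α) : Option α :=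
  match m? with
  | none => some x
  | some m => if before x m then some x else some m

theorem bno_head?_foldl_insertBy {α : Type} (before : α → α → Bool) (xs : List α) (acc : List α) :
    (xs.foldl (fun a x => PySem.List.insertBy before x a) acc).head? =
      xs.foldl (bnoOptStep before) acc.head? := by
  induction xs generalizing acc with
  | nil => rfl
  | cons x xs ih =>
      simp only [List.foldl_cons]
      rw [ih, bno_head?_insertBy]
      cases acc with
      | nil => rfl
      | cons y ys => by_cases h : before x y = true <;> simp [bnoOptStep, h]

theorem bno_head?_sorted2 {α κ₁ κ₂ : Type} [LT κ₁] [DecidableLT κ₁] [LT κ₂] [DecidableLT κ₂]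
    (xs : List α) (k1 : α → κ₁) (k2 : α → κ₂) :
    (PySem.List.sorted2 xs k1 k2 false).head? =
      xs.foldl (bnoOptStep (fun a b =>
        decide (k1 a < k1 b) || (!decide (k1 b < k1 a) && decide (k2 a < k2 b)))) none := by
  have h := bno_head?_foldl_insertBy
    (fun a b => decide (k1 a < k1 b) || (!decide (k1 b < k1 a) && decide (k2 a < k2 b))) xs []
  simpa [PySem.List.sorted2] using h

-- fold two different step functions over the same index list, related by R
theorem bno_foldl_rel {α β γ : Type} (l : List γ) (fA : α → γ → α) (fB : β → γ → β)
    (R : α → β → Prop) {a : α} {b : β}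
    (hstep : ∀ a b x, x ∈ l → R a b → R (fA a x) (fB b x)) (h : R a b) :
    R (l.foldl fA a) (l.foldl fB b) := by
  induction l generalizing a b with
  | nil => exact h
  | cons x xs ih =>
      exact ih (fun a b y hy => hstep a b y (List.mem_cons_of_mem _ hy))
        (hstep a b x (by simp) h)

theorem bno_length_rotation (pcs : List Int) (i : Int) (h0 : 0 ≤ i) (h1 : i ≤ pcs.length) :
    (bnoRotation pcs i).length = pcs.length := by
  unfold bnoRotation
  rw [PySem.List.slice_from _ h0, PySem.List.slice_to _ h0]
  simp only [List.length_append, List.length_map, List.length_drop, List.length_take]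
  omega

-- A's candidate equals B's (key, rotation), with the mod-12 reduction applied
theorem bno_candidate_eq (pcs : List Int) (i : Int) (h0 : 0 ≤ i) (h1 : i ≤ pcs.length) :
    bnoCandidate pcs pcs.length i =
      ((bnoKey (bnoRotation pcs i)).1, (bnoKey (bnoRotation pcs i)).2,
        (bnoRotation pcs i).map (fun p => PySem.Int.mod p 12)) := by
  have hlen : (bnoRotation pcs i).length = pcs.length := bno_length_rotation pcs i h0 h1
  unfold bnoCandidate bnoKey bnoRotation
  simp only []
  refine Prod.ext rfl (Prod.ext ?_ rfl)
  -- the dist components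
  show (PySem.List.pyRange 1 (pcs.length : Int) 1).map
      (fun j => PySem.List.pyGetD (bnoRotation pcs i) j 0 - PySem.List.pyGetD (bnoRotation pcs i) 0 0)
    = (PySem.List.slice (bnoRotation pcs i) (some 1) none).map
      (fun r => r - PySem.List.pyGetD (bnoRotation pcs i) 0 0)
  rw [PySem.List.slice_from_one]
  have := PySem.List.map_pyGetD_pyRange' (bnoRotation pcs i) 0 (a := 1) (by norm_num)
  rw [hlen] at this
  calc (PySem.List.pyRange 1 (pcs.length : Int) 1).map
        (fun j => PySem.List.pyGetD (bnoRotation pcs i) j 0 - PySem.List.pyGetD (bnoRotation pcs i) 0 0)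
      = ((PySem.List.pyRange 1 (pcs.length : Int) 1).map
          (fun j => PySem.List.pyGetD (bnoRotation pcs i) j 0)).map
          (fun r => r - PySem.List.pyGetD (bnoRotation pcs i) 0 0) := by
        rw [List.map_map]; rfl
    _ = ((bnoRotation pcs i).drop (1:Int).toNat).map
          (fun r => r - PySem.List.pyGetD (bnoRotation pcs i) 0 0) := by rw [this]
    _ = (bnoRotation pcs i).tail.map
          (fun r => r - PySem.List.pyGetD (bnoRotation pcs i) 0 0) := by
        norm_num [List.drop_one]

theorem bno_getD_zero_head? {α : Type} (xs : List α) (d : α) : xs.getD 0 d = xs.head?.getD d := by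
  cases xs <;> rfl

theorem bno_main (pc_set : List Int) : best_normal_order pc_set = best_normal_order_alt pc_set := by
  unfold best_normal_order best_normal_order_alt
  set pcs := PySem.List.sorted (PySem.Set.ofList pc_set) (fun x => x) false with hpcs
  by_cases hnil : pcs = []
  · simp [hnil]
  · by_cases h1 : pcs.length = 1
    · simp [hnil, h1]
    · simp only [hnil, h1, if_false]
      have hlen2 : 2 ≤ pcs.length := by
        have h0 : pcs.length ≠ 0 := fun h => hnil (List.length_eq_zero_iff.mp h)
        omega
      -- L := the shared index list 1..n
      have hn0 : (0:Int) < (pcs.length : Int) := by exact_mod_cast Nat.lt_of_lt_of_le Nat.zero_lt_two hlen2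
      rw [PySem.List.foldl_append_singleton_eq_map, List.nil_append,
          PySem.List.pyGetD_zero, bno_getD_zero_head?, bno_head?_sorted2,
          PySem.List.pyRange_one_cons hn0, List.map_cons, List.foldl_cons, List.foldl_map]
      simp only [zero_add]
      set before : (Int × List Int × List Int) → (Int × List Int × List Int) → Bool :=
        fun a b => decide (a.1 < b.1) || (!decide (b.1 < a.1) && decide (a.2.1 < b.2.1)) with hbefore
      set L := PySem.List.pyRange 1 (pcs.length : Int) 1 with hL
      -- relation between A's Option-min state and B's (key, rot) state
      set R : Option (Int × List Int × List Int) → ((Int × List Int) × List Int) → Prop :=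
        fun a b => a = some (b.1.1, b.1.2, b.2.map (fun p => PySem.Int.mod p 12)) with hR
      have hrel : R (L.foldl (fun m? i => bnoOptStep before m? (bnoCandidate pcs (pcs.length : Int) i))
                      (bnoOptStep before none (bnoCandidate pcs (pcs.length : Int) 0)))
                    (L.foldl (fun (best : (Int × List Int) × List Int) i =>
                        let rot := bnoRotation pcs i
                        let k := bnoKey rot
                        if k.1 < best.1.1 ∨ (k.1 = best.1.1 ∧ k.2 < best.1.2) then (k, rot) else best)
                      (bnoKey (bnoRotation pcs 0), bnoRotation pcs 0)) := by
        apply bno_foldl_rel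
        · intro a b i hi hRab
          have hi' : 1 ≤ i ∧ i < (pcs.length : Int) := PySem.List.mem_pyRange_one.mp (hL ▸ hi)
          have hcand := bno_candidate_eq pcs i (by omega) (by exact_mod_cast le_of_lt hi'.2)
          simp only [hR] at hRab
          simp only [hR, hRab, bnoOptStep, hbefore]
          rw [hcand]
          by_cases hlt : (bnoKey (bnoRotation pcs i)).1 < b.1.1
          · simp [hlt]
          · by_cases heq : (bnoKey (bnoRotation pcs i)).1 = b.1.1
            · by_cases hd : (bnoKey (bnoRotation pcs i)).2 < b.1.2
              · simp [heq, hd]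
              · simp [heq, hd]
            · have hgt : b.1.1 < (bnoKey (bnoRotation pcs i)).1 := by
                rcases lt_trichotomy ((bnoKey (bnoRotation pcs i)).1) b.1.1 with h | h | h
                · exact absurd h hlt
                · exact absurd h heq
                · exact h
              simp [hlt, heq, hgt]
        · simp only [hR, bnoOptStep]
          rw [bno_candidate_eq pcs 0 le_rfl (by exact_mod_cast Nat.zero_le _)]
      simp only [hR] at hrel
      rw [hrel]
      rfl

-- ===== VERDICT (by name: the statement is the Claim_ definition above) =====
theorem best_normal_order_spec : Claim_equal_best_normal_order := by
  intro pc_set _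
  unfold Spec_best_normal_order
  exact bno_main pc_set
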